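-- pv_equiv track=rewrite | github.com/rmkenv/neuralagent | chat_assessment.py | assess_certainty_level
-- ===== SOURCE A (Python) =====
-- def assess_certainty_level(text: str) -> str:
--     """Assess overall certainty level of the response."""
--     certain_words = ['definitely', 'certainly', 'absolutely', 'sure', 'confident', 'always', 'never']
--     uncertain_words = ['maybe', 'perhaps', 'possibly', 'might', 'could', 'sometimes', 'usually']
--
--     certain_count = sum(1 for word in certain_words if word in text.lower())
--     uncertain_count = sum(1 for word in uncertain_words if word in text.lower())
--
--     if certain_count > uncertain_count:
--         return 'high'
--     elif uncertain_count > certain_count: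
--         return 'low'
--     else:
--         return 'medium'
-- ===== SOURCE B (Python) =====
-- def assess_certainty_level(text: str) -> str:
--     """Assess overall certainty level of the response."""
--     weights = {'definitely': 1, 'certainly': 1, 'absolutely': 1, 'sure': 1,
--                'confident': 1, 'always': 1, 'never': 1,
--                'maybe': -1, 'perhaps': -1, 'possibly': -1, 'might': -1,
--                'could': -1, 'sometimes': -1, 'usually': -1}
--     lengths = sorted({len(w) for w in weights})
--     t = text.lower()
--     found = set()
--     for i in range(len(t)):
--         for n in lengths:
--             if t[i:i + n] in weights:
--                 found.add(t[i:i + n])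
--     score = sum(v for w, v in weights.items() if w in found)
--     return 'high' if score > 0 else 'low' if score < 0 else 'medium'
-- ===== Notes on version B (the rewrite author's own statement) =====
-- stated objective: alternative
-- what changed: Instead of running 14 separate substring searches and comparing two counts, B scans the lowercased text once position by position, hashes each fixed-length slice into the keyword->weight dict to collect the set of keywords actually present (dictionary-based multi-pattern matching), then sums the weights of the found set and compares the net score with zero.
import Mathlib
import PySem

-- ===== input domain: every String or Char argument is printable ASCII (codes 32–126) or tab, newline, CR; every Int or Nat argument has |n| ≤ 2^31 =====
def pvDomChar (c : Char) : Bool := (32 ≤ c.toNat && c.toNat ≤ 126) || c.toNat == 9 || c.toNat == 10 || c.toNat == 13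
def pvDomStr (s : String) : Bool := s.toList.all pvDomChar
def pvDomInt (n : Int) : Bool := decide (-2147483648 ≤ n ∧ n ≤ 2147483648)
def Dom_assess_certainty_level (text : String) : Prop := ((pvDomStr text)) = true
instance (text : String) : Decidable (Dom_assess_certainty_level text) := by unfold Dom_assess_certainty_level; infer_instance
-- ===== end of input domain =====

-- B replaces A's 14 independent substring searches by one left-to-right scan of the lowercased
-- text that looks each fixed-length slice up in a keyword→weight dict, collecting the set of
-- keywords present, then sums their weights (alternative algorithm, same result).

-- ===== PORT A =====
-- sum(1 for word in ws if word in text.lower())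
def pvHits : List String → String → Int
  | [], _ => 0
  | w :: ws, t => (if PySem.Str.isIn w t then 1 else 0) + pvHits ws t

def assess_certainty_level (text : String) : String :=
  let certain_words := ["definitely", "certainly", "absolutely", "sure", "confident", "always", "never"]
  let uncertain_words := ["maybe", "perhaps", "possibly", "might", "could", "sometimes", "usually"]
  let certain_count := pvHits certain_words (PySem.Str.lower text)
  let uncertain_count := pvHits uncertain_words (PySem.Str.lower text)
  if certain_count > uncertain_count then "high"
  else if uncertain_count > certain_count then "low"
  else "medium"

-- ===== PORT B =====
-- the weights dict (string keys represented as List Char, first-match association list)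
def pvWeightsB : List (List Char × Int) :=
  [("definitely".toList, 1), ("certainly".toList, 1), ("absolutely".toList, 1), ("sure".toList, 1),
   ("confident".toList, 1), ("always".toList, 1), ("never".toList, 1),
   ("maybe".toList, -1), ("perhaps".toList, -1), ("possibly".toList, -1), ("might".toList, -1),
   ("could".toList, -1), ("sometimes".toList, -1), ("usually".toList, -1)]

-- 'piece in weights' tests key membership
def pvKeysB : List (List Char) := pvWeightsB.map Prod.fst

-- lengths = sorted({len(w) for w in weights})
def pvLensB : List Int :=
  PySem.List.sorted (PySem.Set.ofList (pvWeightsB.map (fun p => (p.1.length : Int)))) (fun x => x) false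

-- the position scan: for i in range(len(t)): for n in lengths: if t[i:i+n] in weights: found.add(t[i:i+n])
def pvFoundB (t : List Char) : PySem.Set (List Char) :=
  (PySem.List.pyRange 0 (t.length : Int) 1).foldl
    (fun f i =>
      pvLensB.foldl
        (fun f n =>
          if pvKeysB.contains (PySem.List.slice t (some i) (some (i + n)))
          then PySem.Set.add f (PySem.List.slice t (some i) (some (i + n)))
          else f)
        f)
    PySem.Set.empty

def assess_certainty_level_alt (text : String) : String :=
  let t := PySem.Chars.lower text.toList
  let found := pvFoundB t
  let score : Int :=
    pvWeightsB.foldl (fun s p => if PySem.Set.contains found p.1 then s + p.2 else s) 0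
  if score > 0 then "high" else if score < 0 then "low" else "medium"

-- ===== PRECONDITION & SPEC =====
def Spec_assess_certainty_level (text : String) (out : String) : Prop := out = assess_certainty_level_alt text
instance (text : String) (out : String) : Decidable (Spec_assess_certainty_level text out) := by unfold Spec_assess_certainty_level; infer_instance

-- ===== CLAIM (what is proved, stated in full; the proofs are below) =====
def Claim_equal_assess_certainty_level : Prop := ∀ (text : String), Dom_assess_certainty_level text → Spec_assess_certainty_level text (assess_certainty_level text)

-- ===== LEMMAS AND PROOFS =====

-- membership in the inner (lengths) loop's accumulator
theorem pvMem_inner (t : List Char) (i : Int) (Ls : List Int) (f : PySem.Set (List Char)) (y : List Char) :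
    y ∈ Ls.foldl
        (fun f n =>
          if pvKeysB.contains (PySem.List.slice t (some i) (some (i + n)))
          then PySem.Set.add f (PySem.List.slice t (some i) (some (i + n)))
          else f) f
      ↔ y ∈ f ∨ ∃ n ∈ Ls, PySem.List.slice t (some i) (some (i + n)) = y ∧ pvKeysB.contains y = true := by
  induction Ls generalizing f with
  | nil => simp
  | cons n ns ih =>
    by_cases hc : pvKeysB.contains (PySem.List.slice t (some i) (some (i + n))) = true
    · simp only [List.foldl_cons, hc, if_true, ih, PySem.Set.mem_add, List.mem_cons]
      constructor
      · rintro (((h | rfl) | ⟨m, hm, hs, hk⟩))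
        · exact Or.inl h
        · exact Or.inr ⟨n, Or.inl rfl, rfl, hc⟩
        · exact Or.inr ⟨m, Or.inr hm, hs, hk⟩
      · rintro (h | ⟨m, (rfl | hm), hs, hk⟩)
        · exact Or.inl (Or.inl h)
        · exact Or.inl (Or.inr hs.symm)
        · exact Or.inr ⟨m, hm, hs, hk⟩
    · simp only [List.foldl_cons, hc, ih, List.mem_cons]
      constructor
      · rintro (h | ⟨m, hm, hs, hk⟩)
        · exact Or.inl h
        · exact Or.inr ⟨m, Or.inr hm, hs, hk⟩
      · rintro (h | ⟨m, (rfl | hm), hs, hk⟩)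
        · exact Or.inl h
        · exact absurd (hs ▸ hk) hc
        · exact Or.inr ⟨m, hm, hs, hk⟩

-- membership in the outer (positions) loop's accumulator
theorem pvMem_outer (t : List Char) (Is : List Int) (f : PySem.Set (List Char)) (y : List Char) :
    y ∈ Is.foldl
        (fun f i =>
          pvLensB.foldl
            (fun f n =>
              if pvKeysB.contains (PySem.List.slice t (some i) (some (i + n)))
              then PySem.Set.add f (PySem.List.slice t (some i) (some (i + n)))
              else f) f) f
      ↔ y ∈ f ∨ ∃ i ∈ Is, ∃ n ∈ pvLensB, PySem.List.slice t (some i) (some (i + n)) = y ∧ pvKeysB.contains y = true := by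
  induction Is generalizing f with
  | nil => simp
  | cons i is ih =>
    simp only [List.foldl_cons, ih, pvMem_inner, List.mem_cons]
    constructor
    · rintro ((h | ⟨n, hn, hs, hk⟩) | ⟨j, hj, hrest⟩)
      · exact Or.inl h
      · exact Or.inr ⟨i, Or.inl rfl, n, hn, hs, hk⟩
      · exact Or.inr ⟨j, Or.inr hj, hrest⟩
    · rintro (h | ⟨j, (rfl | hj), hrest⟩)
      · exact Or.inl (Or.inl h)
      · exact Or.inl (Or.inr hrest)
      · exact Or.inr ⟨j, hj, hrest⟩

theorem pvLensB_eq : pvLensB = [4, 5, 6, 7, 8, 9, 10] := by decide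

-- a keyword is in the found set iff it is an infix of the scanned text
theorem pvMem_found (t : List Char) (w : List Char)
    (hk : pvKeysB.contains w = true) (hne : w ≠ []) (hL : ((w.length : Int)) ∈ pvLensB) :
    w ∈ pvFoundB t ↔ w <:+: t := by
  unfold pvFoundB
  rw [pvMem_outer]
  constructor
  · rintro (h | ⟨i, hi, n, hn, hs, -⟩)
    · simp [PySem.Set.empty] at h
    · rw [PySem.List.mem_pyRange_one] at hi
      have h0i : 0 ≤ i := hi.1
      have h0n : 0 ≤ n := by rw [pvLensB_eq] at hn; fin_cases hn <;> norm_num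
      have hin : (0:Int) ≤ i + n := by omega
      rw [show some (i + n) = some (((i + n).toNat : Nat) : Int) by rw [Int.toNat_of_nonneg hin],
        show some i = some ((i.toNat : Nat) : Int) by rw [Int.toNat_of_nonneg h0i],
        PySem.List.slice_natCast] at hs
      rw [← hs]
      exact List.infix_iff_prefix_suffix.mpr
        ⟨t.drop i.toNat, List.take_prefix _ _, List.drop_suffix _ _⟩
  · intro hinf
    obtain ⟨s, hpre, hsuf⟩ := List.infix_iff_prefix_suffix.mp hinf
    have hws : w.length ≤ s.length := hpre.length_le
    have hst : s.length ≤ t.length := hsuf.length_le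
    have hw1 : 0 < w.length := List.length_pos_of_ne_nil hne
    refine Or.inr ⟨((t.length - s.length : Nat) : Int), ?_, (w.length : Int), hL, ?_, hk⟩
    · rw [PySem.List.mem_pyRange_one]
      constructor
      · positivity
      · exact_mod_cast Nat.sub_lt_of_pos_le (by omega) hst
    · have hsd : s = t.drop (t.length - s.length) := List.suffix_iff_eq_drop.mp hsuf
      have hwt : w = s.take w.length := List.prefix_iff_eq_take.mp hpre
      have : ((t.length - s.length : Nat) : Int) + (w.length : Int)
          = (((t.length - s.length) + w.length : Nat) : Int) := by push_cast; ring
      rw [this, PySem.List.slice_natCast,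
        show t.length - s.length + w.length - (t.length - s.length) = w.length by omega]
      exact (hsd ▸ hwt).symm

-- the weighted-sum loop as a conditional sum
def pvCondSum (c : List Char → Bool) : List (List Char × Int) → Int
  | [] => 0
  | (w, k) :: ps => (if c w then k else 0) + pvCondSum c ps

theorem pvFoldl_eq_condSum (c : List Char → Bool) (l : List (List Char × Int)) (a : Int) :
    l.foldl (fun s p => if c p.1 then s + p.2 else s) a = a + pvCondSum c l := by
  induction l generalizing a with
  | nil => simp [pvCondSum]
  | cons p ps ih =>
    obtain ⟨w, k⟩ := p
    simp only [List.foldl_cons, pvCondSum, ih]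
    split_ifs <;> ring

theorem pvCondSum_append (c : List Char → Bool) (p q : List (List Char × Int)) :
    pvCondSum c (p ++ q) = pvCondSum c p + pvCondSum c q := by
  induction p with
  | nil => simp [pvCondSum]
  | cons x xs ih =>
    obtain ⟨w, k⟩ := x
    simp only [List.cons_append, pvCondSum, ih]; ring

theorem pvCondSum_pos (ws : List String) (c : List Char → Bool) (s : String)
    (h : ∀ w ∈ ws, c w.toList = PySem.Str.isIn w s) :
    pvCondSum c (ws.map (fun w => (w.toList, (1 : Int)))) = pvHits ws s := by
  induction ws with
  | nil => rfl
  | cons w ws ih =>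
    simp only [List.map_cons, pvCondSum, pvHits, h w List.mem_cons_self,
      ih fun v hv => h v (List.mem_cons_of_mem _ hv)]

theorem pvCondSum_neg (ws : List String) (c : List Char → Bool) (s : String)
    (h : ∀ w ∈ ws, c w.toList = PySem.Str.isIn w s) :
    pvCondSum c (ws.map (fun w => (w.toList, (-1 : Int)))) = - pvHits ws s := by
  induction ws with
  | nil => simp [pvCondSum, pvHits]
  | cons w ws ih =>
    simp only [List.map_cons, pvCondSum, pvHits, h w List.mem_cons_self,
      ih fun v hv => h v (List.mem_cons_of_mem _ hv)]
    split_ifs <;> ring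

theorem pvWeightsB_eq :
    pvWeightsB =
      (["definitely", "certainly", "absolutely", "sure", "confident", "always", "never"].map
        (fun w => (w.toList, (1 : Int)))) ++
      (["maybe", "perhaps", "possibly", "might", "could", "sometimes", "usually"].map
        (fun w => (w.toList, (-1 : Int)))) := rfl

-- the found-set membership test agrees with Python's substring test, for every keyword
theorem pvKey_cond (text : String) (w : String)
    (hk : pvKeysB.contains w.toList = true) (hne : w.toList ≠ []) (hL : ((w.toList.length : Int)) ∈ pvLensB) :
    PySem.Set.contains (pvFoundB (PySem.Chars.lower text.toList)) w.toList
      = PySem.Str.isIn w (PySem.Str.lower text) := by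
  rw [Bool.eq_iff_iff]
  rw [PySem.Str.isIn_iff_infix, PySem.Str.toList_lower]
  rw [show (PySem.Set.contains (pvFoundB (PySem.Chars.lower text.toList)) w.toList = true)
      ↔ w.toList ∈ pvFoundB (PySem.Chars.lower text.toList) by simp [pysem]]
  exact pvMem_found _ _ hk hne hL

-- ===== VERDICT (by name: the statement is the Claim_ definition above) =====
theorem assess_certainty_level_spec : Claim_equal_assess_certainty_level := by
  intro text _
  show assess_certainty_level text = assess_certainty_level_alt text
  have hpos : ∀ w ∈ ["definitely", "certainly", "absolutely", "sure", "confident", "always", "never"],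
      PySem.Set.contains (pvFoundB (PySem.Chars.lower text.toList)) w.toList
        = PySem.Str.isIn w (PySem.Str.lower text) := by
    intro w hw
    fin_cases hw <;> exact pvKey_cond text _ (by decide) (by decide) (by decide)
  have hneg : ∀ w ∈ ["maybe", "perhaps", "possibly", "might", "could", "sometimes", "usually"],
      PySem.Set.contains (pvFoundB (PySem.Chars.lower text.toList)) w.toList
        = PySem.Str.isIn w (PySem.Str.lower text) := by
    intro w hw
    fin_cases hw <;> exact pvKey_cond text _ (by decide) (by decide) (by decide)
  simp only [assess_certainty_level, assess_certainty_level_alt]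
  rw [pvFoldl_eq_condSum, pvWeightsB_eq, pvCondSum_append,
    pvCondSum_pos _ _ (PySem.Str.lower text) hpos,
    pvCondSum_neg _ _ (PySem.Str.lower text) hneg]
  split_ifs <;> first | rfl | omega
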